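-- pv_equiv track=rewrite | github.com/faterazer/LeetCode | 0820. Short Encoding of Words/Solution.py | minimumLengthEncoding_MK1
-- ===== SOURCE A (Python) =====
-- from typing import Dict, List
--
-- def minimumLengthEncoding_MK1(words: List[str]) -> int:
--     '''
--     暴力哈希
--     '''
--     hash_set = set(words)
--     for word in words:
--         for i in range(1, len(word)):
--             if word[i:] in hash_set:
--                 hash_set.remove(word[i:])
--     ans = 0
--     for word in hash_set:
--         ans += len(word) + 1
--     return ans
-- ===== SOURCE B (Python) =====
-- from typing import List
--
-- def minimumLengthEncoding_MK1(words: List[str]) -> int: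
--     # Sort the reversed words: a word is suffix-redundant exactly when its
--     # reversal is a nonempty proper prefix of its immediate sorted successor.
--     rs = sorted({w[::-1] for w in words})
--     total = 0
--     for r, nxt in zip(rs, rs[1:]):
--         if not (r and nxt.startswith(r)):
--             total += len(r) + 1
--     return total + (len(rs[-1]) + 1 if rs else 0)
-- ===== Notes on version B (the rewrite author's own statement) =====
-- stated objective: faster
-- what changed: Instead of generating every proper suffix of every word and deleting it from a hash set, B sorts the deduplicated reversed words once and keeps a word unless its reversal is a nonempty proper prefix of its immediate sorted successor.
import Mathlib
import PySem

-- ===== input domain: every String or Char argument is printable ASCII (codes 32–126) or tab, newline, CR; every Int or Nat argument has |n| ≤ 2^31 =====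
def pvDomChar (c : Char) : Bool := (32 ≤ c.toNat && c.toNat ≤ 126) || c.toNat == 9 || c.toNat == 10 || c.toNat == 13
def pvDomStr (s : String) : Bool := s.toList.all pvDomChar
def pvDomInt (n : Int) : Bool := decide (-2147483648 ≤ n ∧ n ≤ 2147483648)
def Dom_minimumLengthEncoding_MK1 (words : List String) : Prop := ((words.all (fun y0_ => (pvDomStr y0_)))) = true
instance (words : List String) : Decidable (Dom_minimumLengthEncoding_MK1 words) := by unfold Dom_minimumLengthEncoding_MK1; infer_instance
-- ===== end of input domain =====

-- B replaces A's scan over every proper suffix of every word by sorting the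
-- deduplicated reversed words once and comparing each entry with its sorted successor.

-- ===== PORT A =====
def minimumLengthEncoding_MK1 (words : List String) : Int :=
  let hs := PySem.Set.ofList words
  let hs2 := words.foldl (fun hs word =>
    (PySem.List.pyRange 1 (PySem.Str.len word) 1).foldl (fun hs i =>
      if PySem.Set.contains hs (PySem.Str.slice word (some i) none) then
        (PySem.Set.remove? hs (PySem.Str.slice word (some i) none)).getD hs
      else hs) hs) hs
  hs2.foldl (fun ans word => ans + PySem.Str.len word + 1) 0

-- ===== PORT B =====
def minimumLengthEncoding_MK1_alt (words : List String) : Int :=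
  let rs := PySem.List.sorted (PySem.Set.ofList (words.map (fun w => (PySem.Str.slice? w none none (-1)).getD w))) (fun x => x) false
  let total := (rs.zip (PySem.List.slice rs (some 1) none)).foldl (fun total p =>
    if !(decide (p.1 ≠ "") && PySem.Str.startswith p.2 p.1) then total + PySem.Str.len p.1 + 1 else total) 0
  total + (if rs.length ≠ 0 then PySem.Str.len ((PySem.List.pyGet? rs (-1)).getD "") + 1 else 0)

-- ===== PRECONDITION & SPEC =====
def Spec_minimumLengthEncoding_MK1 (words : List String) (out : Int) : Prop := out = minimumLengthEncoding_MK1_alt words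
instance (words : List String) (out : Int) : Decidable (Spec_minimumLengthEncoding_MK1 words out) := by unfold Spec_minimumLengthEncoding_MK1; infer_instance

-- ===== CLAIM (what is proved, stated in full; the proofs are below) =====
def Claim_equal_minimumLengthEncoding_MK1 : Prop := ∀ (words : List String), Dom_minimumLengthEncoding_MK1 words → Spec_minimumLengthEncoding_MK1 words (minimumLengthEncoding_MK1 words)

-- ===== LEMMAS AND PROOFS =====

/-- reversal of a word, as B's `w[::-1]` produces it -/
def pvRev (w : String) : String := String.ofList w.toList.reverse

/-- common summand: a word contributes `len + 1` unless it is a nonempty proper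
suffix of some word of the input -/
def pvG (words : List String) (w : String) : Int :=
  if w ≠ "" ∧ ∃ v ∈ words, w.toList <:+ v.toList ∧ w ≠ v then 0 else PySem.Str.len w + 1

/-- the suffix keys A's inner loop generates for one word -/
def pvKeys (w : String) : List String :=
  (PySem.List.pyRange 1 (PySem.Str.len w) 1).map (fun i => PySem.Str.slice w (some i) none)

/-- B's pair loop, as structural recursion on the sorted list -/
def pvBsum : List String → Int
  | [] => 0
  | [r] => PySem.Str.len r + 1
  | r :: s :: t =>
      (if r ≠ "" ∧ PySem.Str.startswith s r = true then 0 else PySem.Str.len r + 1) + pvBsum (s :: t)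

-- ---- order lemmas on lists ----

theorem pv_prefix_between {α : Type} [LinearOrder α] (r : List α) :
    ∀ (s t : List α), (r < s ∨ r = s) → (s < t ∨ s = t) → r <+: t → r <+: s := by
  induction r with
  | nil => intro s t _ _ _; exact List.nil_prefix
  | cons a r' ih =>
    intro s t hrs hst hpre
    rcases hrs with hlt | rfl
    · cases s with
      | nil => exact absurd hlt (List.not_lt_nil _)
      | cons b s' =>
        rcases hst with hlt2 | rfl
        · cases t with
          | nil => exact absurd hlt2 (List.not_lt_nil _)
          | cons c t' =>
            rcases List.cons_prefix_cons.mp hpre with ⟨rfl, hpre'⟩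
            rcases List.cons_lt_cons_iff.mp hlt with h1 | ⟨rfl, h1⟩
            · rcases List.cons_lt_cons_iff.mp hlt2 with h2 | ⟨rfl, h2⟩
              · exact absurd h1 (lt_asymm h2)
              · exact absurd h1 (lt_irrefl _)
            · rcases List.cons_lt_cons_iff.mp hlt2 with h2 | ⟨-, h2⟩
              · exact absurd h2 (lt_irrefl _)
              · exact List.cons_prefix_cons.mpr ⟨rfl, ih _ _ (Or.inl h1) (Or.inl h2) hpre'⟩
        · exact hpre
    · exact List.prefix_refl _

theorem pv_proper_prefix_lt {α : Type} [LinearOrder α] (l : List α) :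
    ∀ (m : List α), l <+: m → l ≠ m → l < m := by
  induction l with
  | nil =>
    intro m _ hne
    cases m with
    | nil => exact absurd rfl hne
    | cons c m' => exact List.nil_lt_cons _ _
  | cons a l' ih =>
    intro m hpre hne
    cases m with
    | nil => simp at hpre
    | cons b m' =>
      rcases List.cons_prefix_cons.mp hpre with ⟨rfl, hpre'⟩
      refine List.cons_lt_cons_iff.mpr (Or.inr ⟨rfl, ih _ hpre' ?_⟩)
      intro h; exact hne (by rw [h])

theorem pv_str_lt_ne {r s : String} (h : r < s) : r ≠ s := by
  intro he
  rw [he] at h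
  exact absurd (String.lt_iff_toList_lt.mp h) (lt_irrefl _)

-- ---- A side: the removal loop is a filter ----

theorem pv_step_eq (hs : PySem.Set String) (k : String) :
    (if PySem.Set.contains hs k then (PySem.Set.remove? hs k).getD hs else hs)
      = hs.filter (fun y => !(y == k)) := by
  by_cases hk : k ∈ hs
  · simp [PySem.Set.remove?, PySem.Set.discard, hk]
  · have hc : PySem.Set.contains hs k = true → False := fun h => hk ((PySem.Set.contains_iff hs k).mp h)
    have hc' : PySem.Set.contains hs k = false := by
      cases h : PySem.Set.contains hs k
      · rfl
      · exact absurd h hc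
    rw [hc']
    simp only [Bool.false_eq_true, if_false]
    symm
    apply List.filter_eq_self.mpr
    intro y hy
    simp only [Bool.not_eq_eq_eq_not, Bool.not_true, beq_eq_false_iff_ne]
    intro h; exact hk (h ▸ hy)

theorem pv_erase_fold (ks : List String) :
    ∀ (hs : List String),
      ks.foldl (fun hs k => hs.filter (fun y => !(y == k))) hs
        = hs.filter (fun y => decide (y ∉ ks)) := by
  induction ks with
  | nil => intro hs; simp
  | cons k ks ih =>
    intro hs
    simp only [List.foldl_cons, ih, List.filter_filter]
    apply List.filter_congr
    intro y _
    by_cases h1 : y = k <;> by_cases h2 : y ∈ ks <;> simp [h1, h2]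

theorem pv_inner_fold (w : String) (hs : PySem.Set String) :
    (PySem.List.pyRange 1 (PySem.Str.len w) 1).foldl (fun hs i =>
        if PySem.Set.contains hs (PySem.Str.slice w (some i) none) then
          (PySem.Set.remove? hs (PySem.Str.slice w (some i) none)).getD hs
        else hs) hs
      = hs.filter (fun y => decide (y ∉ pvKeys w)) := by
  have h1 : (fun (hs : PySem.Set String) (i : Int) =>
      if PySem.Set.contains hs (PySem.Str.slice w (some i) none) then
        (PySem.Set.remove? hs (PySem.Str.slice w (some i) none)).getD hs
      else hs)
      = (fun (hs : PySem.Set String) (i : Int) =>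
        hs.filter (fun y => !(y == PySem.Str.slice w (some i) none))) := by
    funext hs i; exact pv_step_eq hs _
  rw [h1]
  have h2 : List.foldl (fun (hs : List String) (k : String) => List.filter (fun y => !(y == k)) hs)
      hs (pvKeys w)
      = List.foldl (fun (hs : List String) (i : Int) =>
          List.filter (fun y => !(y == PySem.Str.slice w (some i) none)) hs) hs
          (PySem.List.pyRange 1 (PySem.Str.len w) 1) := by
    unfold pvKeys
    rw [List.foldl_map]
  rw [← h2]
  exact pv_erase_fold _ hs

theorem pv_outer_fold (words : List String) :
    ∀ (hs : List String),
      words.foldl (fun hs word => hs.filter (fun y => decide (y ∉ pvKeys word))) hs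
        = hs.filter (fun y => decide (¬ ∃ w ∈ words, y ∈ pvKeys w)) := by
  induction words with
  | nil => intro hs; simp
  | cons w ws ih =>
    intro hs
    rw [List.foldl_cons, ih, List.filter_filter]
    apply List.filter_congr
    intro y _
    by_cases h1 : y ∈ pvKeys w <;> by_cases h2 : ∃ u ∈ ws, y ∈ pvKeys u <;>
      simp [h1, h2]

theorem pv_slice_toList (w : String) (i : Int) (hi : 0 ≤ i) :
    (PySem.Str.slice w (some i) none).toList = w.toList.drop i.toNat := by
  simp [PySem.Str.toList_slice, PySem.List.slice_from _ hi]

theorem pv_mem_keys (y v : String) :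
    y ∈ pvKeys v ↔ (y.toList <:+ v.toList ∧ y ≠ "" ∧ y.toList.length < v.toList.length) := by
  unfold pvKeys
  simp only [List.mem_map]
  constructor
  · rintro ⟨i, hi, rfl⟩
    rw [PySem.List.mem_pyRange_iff_of_pos (by norm_num)] at hi
    obtain ⟨h1, h2, -⟩ := hi
    rw [PySem.Str.len_eq] at h2
    have h0 : (0:Int) ≤ i := by omega
    have hdrop := pv_slice_toList v i h0
    refine ⟨hdrop ▸ List.drop_suffix _ _, ?_, ?_⟩
    · intro hempty
      have : (PySem.Str.slice v (some i) none).toList = [] := by rw [hempty]; rfl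
      rw [hdrop] at this
      have h3 := congrArg List.length this
      rw [List.length_drop] at h3
      simp only [List.length_nil] at h3
      omega
    · rw [hdrop, List.length_drop]
      omega
  · rintro ⟨hsuf, hne, hlt⟩
    refine ⟨(v.toList.length : Int) - (y.toList.length : Int), ?_, ?_⟩
    · rw [PySem.List.mem_pyRange_iff_of_pos (by norm_num), PySem.Str.len_eq]
      have hy0 : y.toList.length ≠ 0 := by
        intro h
        exact hne (String.toList_inj.mp (by simp [List.length_eq_zero_iff.mp h]))
      exact ⟨by omega, by omega, one_dvd _⟩
    · apply String.toList_inj.mp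
      rw [pv_slice_toList _ _ (by omega)]
      have h4 : ((v.toList.length : Int) - (y.toList.length : Int)).toNat = v.toList.length - y.toList.length := by omega
      rw [h4]
      exact (List.suffix_iff_eq_drop.mp hsuf).symm

theorem pv_sum_fold (l : List String) :
    l.foldl (fun ans word => ans + PySem.Str.len word + 1) 0
      = (l.map (fun w => PySem.Str.len w + 1)).sum := by
  have h : (fun (ans : Int) (word : String) => ans + PySem.Str.len word + 1)
       = (fun (ans : Int) (word : String) => ans + (PySem.Str.len word + 1)) := by
    funext a w; ring
  rw [h, PySem.List.foldl_add]; ring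

theorem pv_sum_filter (p : String → Bool) (l : List String) :
    ((l.filter p).map (fun w => PySem.Str.len w + 1)).sum
      = (l.map (fun w => if p w then PySem.Str.len w + 1 else 0)).sum := by
  induction l with
  | nil => simp
  | cons x t ih =>
    by_cases h : p x
    · simp only [List.filter_cons_of_pos h, List.map_cons, List.sum_cons, ih, if_pos h]
    · simp only [List.filter_cons_of_neg h, List.map_cons, List.sum_cons, ih, if_neg h, zero_add]

/-- A computes the sum of `pvG` over the distinct words. -/
theorem pv_A_eq (words : List String) :
    minimumLengthEncoding_MK1 words = ((PySem.Set.ofList words).map (pvG words)).sum := by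
  unfold minimumLengthEncoding_MK1
  dsimp only
  have hfn : (fun (hs : PySem.Set String) (word : String) =>
      (PySem.List.pyRange 1 (PySem.Str.len word) 1).foldl (fun hs i =>
        if PySem.Set.contains hs (PySem.Str.slice word (some i) none) then
          (PySem.Set.remove? hs (PySem.Str.slice word (some i) none)).getD hs
        else hs) hs)
      = (fun (hs : PySem.Set String) (word : String) =>
        hs.filter (fun y => decide (y ∉ pvKeys word))) := by
    funext hs w; exact pv_inner_fold w hs
  rw [hfn, pv_outer_fold, pv_sum_fold, pv_sum_filter]
  refine congrArg List.sum (List.map_congr_left ?_)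
  intro w hw
  unfold pvG
  by_cases hbad : w ≠ "" ∧ ∃ v ∈ words, w.toList <:+ v.toList ∧ w ≠ v
  · rw [if_pos hbad]
    have hex : ∃ u ∈ words, w ∈ pvKeys u := by
      obtain ⟨hne, v, hv, hsuf, hnev⟩ := hbad
      refine ⟨v, hv, (pv_mem_keys w v).mpr ⟨hsuf, hne, ?_⟩⟩
      rcases Nat.lt_or_ge w.toList.length v.toList.length with h | h
      · exact h
      · exact absurd (String.toList_inj.mp (List.IsSuffix.eq_of_length hsuf
          (Nat.le_antisymm (List.IsSuffix.length_le hsuf) h))) hnev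
    simp [hex]
  · rw [if_neg hbad]
    have hnex : ¬ ∃ u ∈ words, w ∈ pvKeys u := by
      rintro ⟨u, hu, hk⟩
      obtain ⟨hsuf, hne, hlt⟩ := (pv_mem_keys w u).mp hk
      exact hbad ⟨hne, u, hu, hsuf, by intro h; subst h; exact absurd rfl (Nat.ne_of_lt hlt)⟩
    simp [hnex]

-- ---- B side: the pair loop sums survivors of the sorted reversed words ----

theorem pv_pyGet_neg_one (l : List String) : PySem.List.pyGet? l (-1) = l.getLast? := by
  cases l with
  | nil => simp [PySem.List.pyGet?, PySem.List.pyIdx?]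
  | cons x t =>
    simp [PySem.List.pyGet?, PySem.List.pyIdx?, List.getLast?_eq_getElem?]

theorem pv_zip_fold (l : List String) :
    ∀ (a : Int),
      (l.zip l.tail).foldl (fun total p =>
          if !(decide (p.1 ≠ "") && PySem.Str.startswith p.2 p.1) then total + PySem.Str.len p.1 + 1 else total) a
        + (if l.length ≠ 0 then PySem.Str.len ((PySem.List.pyGet? l (-1)).getD "") + 1 else 0)
      = a + pvBsum l := by
  induction l with
  | nil => intro a; simp [pvBsum]
  | cons r t ih =>
    intro a
    cases t with
    | nil =>
      simp [pvBsum, pv_pyGet_neg_one]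
    | cons s t' =>
      have hzip : ((r :: s :: t').zip (r :: s :: t').tail)
          = (r, s) :: ((s :: t').zip (s :: t').tail) := by simp
      rw [hzip, List.foldl_cons]
      have hlast : PySem.List.pyGet? (r :: s :: t') (-1) = PySem.List.pyGet? (s :: t') (-1) := by
        rw [pv_pyGet_neg_one, pv_pyGet_neg_one, List.getLast?_cons_cons]
      rw [hlast]
      rw [show ((if (r :: s :: t').length ≠ 0 then PySem.Str.len ((PySem.List.pyGet? (s :: t') (-1)).getD "") + 1 else 0))
          = (if (s :: t').length ≠ 0 then PySem.Str.len ((PySem.List.pyGet? (s :: t') (-1)).getD "") + 1 else 0) by simp]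
      rw [ih]
      show _ = a + pvBsum (r :: s :: t')
      rw [show pvBsum (r :: s :: t') = (if r ≠ "" ∧ PySem.Str.startswith s r = true then 0 else PySem.Str.len r + 1) + pvBsum (s :: t') from rfl]
      by_cases hc : r ≠ "" ∧ PySem.Str.startswith s r = true
      · have hb : (!(decide (r ≠ "") && PySem.Str.startswith s r)) = false := by
          rw [decide_eq_true hc.1, hc.2]; rfl
        rw [hb]
        simp only [Bool.false_eq_true, if_false, if_pos hc]
        ring
      · have hb : (!(decide (r ≠ "") && PySem.Str.startswith s r)) = true := by
          rcases Decidable.not_and_iff_not_or_not.mp hc with h | h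
          · rw [decide_eq_false h]; rfl
          · have hsw : PySem.Str.startswith s r = false := by
              revert h; cases PySem.Str.startswith s r <;> simp
            rw [hsw, Bool.and_false]; rfl
        rw [hb, if_pos rfl, if_neg hc]
        ring

theorem pv_bsum_eq_sum (l : List String) (hso : l.Pairwise (· < ·)) :
    pvBsum l = (l.map (fun r =>
        if r ≠ "" ∧ ∃ s ∈ l, r.toList <+: s.toList ∧ r ≠ s then 0 else PySem.Str.len r + 1)).sum := by
  induction l using pvBsum.induct with
  | case1 => simp [pvBsum]
  | case2 r =>
    have hno : ¬ (r ≠ "" ∧ ∃ s ∈ [r], r.toList <+: s.toList ∧ r ≠ s) := by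
      rintro ⟨-, s, hs, -, hne⟩
      simp only [List.mem_singleton] at hs
      exact hne hs.symm
    simp only [pvBsum, List.map_cons, List.map_nil, List.sum_cons, List.sum_nil, if_neg hno]
    ring
  | case3 r s t ih =>
    have hrs : r < s := (List.pairwise_cons.mp hso).1 s (by simp)
    have hr_all : ∀ u ∈ s :: t, r < u := (List.pairwise_cons.mp hso).1
    have hso' : (s :: t).Pairwise (· < ·) := (List.pairwise_cons.mp hso).2
    have key1 : (r ≠ "" ∧ PySem.Str.startswith s r = true)
        ↔ (r ≠ "" ∧ ∃ u ∈ r :: s :: t, r.toList <+: u.toList ∧ r ≠ u) := by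
      constructor
      · rintro ⟨hne, hsw⟩
        rw [PySem.Str.startswith_eq] at hsw
        exact ⟨hne, s, by simp, (PySem.Chars.startswith_iff _ _).mp hsw, pv_str_lt_ne hrs⟩
      · rintro ⟨hne, u, hu, hpre, hneu⟩
        refine ⟨hne, ?_⟩
        rw [PySem.Str.startswith_eq]
        apply (PySem.Chars.startswith_iff _ _).mpr
        rcases List.mem_cons.mp hu with rfl | hu'
        · exact absurd rfl hneu
        · have hsu : s < u ∨ s = u := by
            rcases List.mem_cons.mp hu' with rfl | hu''
            · exact Or.inr rfl
            · exact Or.inl ((List.pairwise_cons.mp hso').1 u hu'')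
          have hsu' : s.toList < u.toList ∨ s.toList = u.toList := by
            rcases hsu with h | h
            · exact Or.inl (String.lt_iff_toList_lt.mp h)
            · exact Or.inr (by rw [h])
          exact pv_prefix_between r.toList s.toList u.toList
            (Or.inl (String.lt_iff_toList_lt.mp hrs)) hsu' hpre
    have key2 : ∀ x ∈ s :: t,
        ((x ≠ "" ∧ ∃ u ∈ s :: t, x.toList <+: u.toList ∧ x ≠ u)
          ↔ (x ≠ "" ∧ ∃ u ∈ r :: s :: t, x.toList <+: u.toList ∧ x ≠ u)) := by
      intro x hx
      constructor
      · rintro ⟨hne, u, hu, hpre, hneu⟩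
        exact ⟨hne, u, List.mem_cons_of_mem _ hu, hpre, hneu⟩
      · rintro ⟨hne, u, hu, hpre, hneu⟩
        refine ⟨hne, ?_⟩
        rcases List.mem_cons.mp hu with rfl | hu'
        · exfalso
          have hxr : x.toList < u.toList := pv_proper_prefix_lt _ _ hpre
            (fun h => hneu (String.toList_inj.mp h))
          have hrx : u < x := hr_all x hx
          exact absurd hxr (lt_asymm (String.lt_iff_toList_lt.mp hrx))
        · exact ⟨u, hu', hpre, hneu⟩
    show (if r ≠ "" ∧ PySem.Str.startswith s r = true then 0 else PySem.Str.len r + 1) + pvBsum (s :: t) = _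
    rw [List.map_cons, List.sum_cons, ih hso']
    have hhead : (if r ≠ "" ∧ PySem.Str.startswith s r = true then (0:Int) else PySem.Str.len r + 1)
        = (if r ≠ "" ∧ ∃ u ∈ r :: s :: t, r.toList <+: u.toList ∧ r ≠ u then 0 else PySem.Str.len r + 1) := by
      by_cases h : r ≠ "" ∧ PySem.Str.startswith s r = true
      · rw [if_pos h, if_pos (key1.mp h)]
      · rw [if_neg h, if_neg (fun hh => h (key1.mpr hh))]
    have htail : ((s :: t).map (fun x =>
          if x ≠ "" ∧ ∃ u ∈ s :: t, x.toList <+: u.toList ∧ x ≠ u then (0:Int) else PySem.Str.len x + 1))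
        = ((s :: t).map (fun x =>
          if x ≠ "" ∧ ∃ u ∈ r :: s :: t, x.toList <+: u.toList ∧ x ≠ u then 0 else PySem.Str.len x + 1)) := by
      apply List.map_congr_left
      intro x hx
      by_cases h : x ≠ "" ∧ ∃ u ∈ s :: t, x.toList <+: u.toList ∧ x ≠ u
      · rw [if_pos h, if_pos ((key2 x hx).mp h)]
      · rw [if_neg h, if_neg (fun hh => h ((key2 x hx).mpr hh))]
    rw [hhead, htail]

theorem pv_ofList_map_inj (f : String → String) (hf : Function.Injective f) (l : List String) :
    PySem.Set.ofList (l.map f) = (PySem.Set.ofList l).map f := by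
  rw [PySem.Set.ofList_eq_foldl, PySem.Set.ofList_eq_foldl]
  have main : ∀ (s : List String),
      (l.map f).foldl PySem.Set.add (s.map f) = (l.foldl PySem.Set.add s).map f := by
    induction l with
    | nil => intro s; simp
    | cons x t ih =>
      intro s
      simp only [List.map_cons, List.foldl_cons]
      have hadd : PySem.Set.add (s.map f) (f x) = (PySem.Set.add s x).map f := by
        unfold PySem.Set.add
        by_cases hm : x ∈ s
        · have h1 : PySem.Set.contains (s.map f) (f x) = true :=
            (PySem.Set.contains_iff _ _).mpr (List.mem_map_of_mem hm)
          have h2 : PySem.Set.contains s x = true := (PySem.Set.contains_iff _ _).mpr hm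
          rw [h1, h2]; simp
        · have h1 : PySem.Set.contains (s.map f) (f x) = false := by
            cases h : PySem.Set.contains (s.map f) (f x)
            · rfl
            · exfalso
              obtain ⟨y, hy, hyx⟩ := List.mem_map.mp ((PySem.Set.contains_iff _ _).mp h)
              exact hm (hf hyx ▸ hy)
          have h2 : PySem.Set.contains s x = false := by
            cases h : PySem.Set.contains s x
            · rfl
            · exact absurd ((PySem.Set.contains_iff _ _).mp h) hm
          rw [h1, h2]; simp
      rw [hadd, ih]
  simpa using main []

theorem pv_rev_inj : Function.Injective pvRev := by
  intro a b h
  have h2 := congrArg String.toList h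
  simp only [pvRev, String.toList_ofList] at h2
  exact String.toList_inj.mp (List.reverse_injective h2)

theorem pv_rev_toList (w : String) : (pvRev w).toList = w.toList.reverse := by
  simp [pvRev, String.toList_ofList]

theorem pv_rev_eq_empty_iff (w : String) : pvRev w = "" ↔ w = "" := by
  constructor
  · intro h
    have h2 := congrArg String.toList h
    rw [pv_rev_toList] at h2
    simp only [String.toList_empty] at h2
    exact String.toList_inj.mp (List.reverse_eq_nil_iff.mp h2)
  · rintro rfl; rfl

theorem pv_rev_len (w : String) : PySem.Str.len (pvRev w) = PySem.Str.len w := by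
  rw [PySem.Str.len_eq, PySem.Str.len_eq, pv_rev_toList, List.length_reverse]

/-- B computes the same sum. -/
theorem pv_B_eq (words : List String) :
    minimumLengthEncoding_MK1_alt words = ((PySem.Set.ofList words).map (pvG words)).sum := by
  unfold minimumLengthEncoding_MK1_alt
  dsimp only
  have hrevfun : (fun w => (PySem.Str.slice? w none none (-1)).getD w) = pvRev := by
    funext w
    rw [PySem.Str.slice?_none_none_neg_one, Option.getD_some]
    rfl
  rw [hrevfun]
  set S := PySem.Set.ofList (words.map pvRev) with hS
  set rs := PySem.List.sorted S (fun x => x) false with hrs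
  rw [PySem.List.slice_from_one, pv_zip_fold rs 0, zero_add]
  have hso : rs.Pairwise (· < ·) := PySem.List.sorted_ofList_pairwise_lt (words.map pvRev)
  rw [pv_bsum_eq_sum rs hso]
  have hmemiff : ∀ x, x ∈ rs ↔ x ∈ words.map pvRev := by
    intro x
    rw [hrs, PySem.List.mem_sorted, hS, PySem.Set.mem_ofList]
  have hfun : (rs.map (fun r =>
      if r ≠ "" ∧ ∃ s ∈ rs, r.toList <+: s.toList ∧ r ≠ s then (0:Int) else PySem.Str.len r + 1))
      = rs.map (fun r =>
      if r ≠ "" ∧ ∃ s ∈ words.map pvRev, r.toList <+: s.toList ∧ r ≠ s then 0 else PySem.Str.len r + 1) := by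
    apply List.map_congr_left
    intro r _
    have hiff : (r ≠ "" ∧ ∃ s ∈ rs, r.toList <+: s.toList ∧ r ≠ s)
        ↔ (r ≠ "" ∧ ∃ s ∈ words.map pvRev, r.toList <+: s.toList ∧ r ≠ s) := by
      constructor
      · rintro ⟨h1, s, hs, h2, h3⟩; exact ⟨h1, s, (hmemiff s).mp hs, h2, h3⟩
      · rintro ⟨h1, s, hs, h2, h3⟩; exact ⟨h1, s, (hmemiff s).mpr hs, h2, h3⟩
    by_cases h : r ≠ "" ∧ ∃ s ∈ rs, r.toList <+: s.toList ∧ r ≠ s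
    · rw [if_pos h, if_pos (hiff.mp h)]
    · rw [if_neg h, if_neg (fun hh => h (hiff.mpr hh))]
  rw [hfun]
  have hperm : rs.Perm S := PySem.List.sorted_perm S (fun x => x) false
  rw [List.Perm.sum_eq (List.Perm.map _ hperm)]
  rw [hS, pv_ofList_map_inj pvRev pv_rev_inj, List.map_map]
  refine congrArg List.sum (List.map_congr_left ?_)
  intro w hw
  simp only [Function.comp]
  have hcond : (pvRev w ≠ "" ∧ ∃ s ∈ words.map pvRev, (pvRev w).toList <+: s.toList ∧ pvRev w ≠ s)
      ↔ (w ≠ "" ∧ ∃ v ∈ words, w.toList <:+ v.toList ∧ w ≠ v) := by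
    constructor
    · rintro ⟨h1, s, hs, h2, h3⟩
      obtain ⟨v, hv, rfl⟩ := List.mem_map.mp hs
      refine ⟨fun h => h1 (by rw [h]; rfl), v, hv, ?_, fun h => h3 (by rw [h])⟩
      rw [pv_rev_toList, pv_rev_toList] at h2
      exact List.reverse_prefix.mp h2
    · rintro ⟨h1, v, hv, h2, h3⟩
      refine ⟨fun h => h1 ((pv_rev_eq_empty_iff w).mp h), pvRev v, List.mem_map_of_mem hv, ?_,
        fun h => h3 (pv_rev_inj h)⟩
      rw [pv_rev_toList, pv_rev_toList]
      exact List.reverse_prefix.mpr h2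
  unfold pvG
  by_cases h : w ≠ "" ∧ ∃ v ∈ words, w.toList <:+ v.toList ∧ w ≠ v
  · rw [if_pos (hcond.mpr h), if_pos h]
  · rw [if_neg (fun hh => h (hcond.mp hh)), if_neg h, pv_rev_len]

-- ===== VERDICT (by name: the statement is the Claim_ definition above) =====
theorem minimumLengthEncoding_MK1_spec : Claim_equal_minimumLengthEncoding_MK1 := by
  intro words _
  unfold Spec_minimumLengthEncoding_MK1
  rw [pv_A_eq, pv_B_eq]
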